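-- pv_equiv track=rewrite | github.com/mitsuo0114/competitive_programming | python/atcoder/Grand005/A.py | solve
-- ===== SOURCE A (Python) =====
-- def solve(X):
--     ans = 0
--     count = 0
--     for c in X:
--         if c == "S":
--             count += 1
--         else:
--             if count > 0:
--                 count -= 1
--             else:
--                 ans += 1
--     ans += count
--     return ans
-- ===== SOURCE B (Python) =====
-- def _dc(s):
--     # unmatched (closes, opens) of s, by divide and conquer with a monoid merge
--     if len(s) == 0:
--         return (0, 0)
--     if len(s) == 1:
--         return (0, 1) if s == "S" else (1, 0)
--     mid = len(s) // 2
--     c1, o1 = _dc(s[:mid])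
--     c2, o2 = _dc(s[mid:])
--     return (c1 + max(0, c2 - o1), o2 + max(0, o1 - c2))
--
-- def solve(X):
--     c, o = _dc(X)
--     return c + o
-- ===== Notes on version B (the rewrite author's own statement) =====
-- stated objective: alternative
-- what changed: Replaces the left-to-right clamped-counter scan with a divide-and-conquer reduction: each half is summarized as a pair (unmatched closes, unmatched opens) and the halves are merged by a monoid operation (c1+max(0,c2-o1), o2+max(0,o1-c2)); the answer is the sum of the root pair.
import Mathlib
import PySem

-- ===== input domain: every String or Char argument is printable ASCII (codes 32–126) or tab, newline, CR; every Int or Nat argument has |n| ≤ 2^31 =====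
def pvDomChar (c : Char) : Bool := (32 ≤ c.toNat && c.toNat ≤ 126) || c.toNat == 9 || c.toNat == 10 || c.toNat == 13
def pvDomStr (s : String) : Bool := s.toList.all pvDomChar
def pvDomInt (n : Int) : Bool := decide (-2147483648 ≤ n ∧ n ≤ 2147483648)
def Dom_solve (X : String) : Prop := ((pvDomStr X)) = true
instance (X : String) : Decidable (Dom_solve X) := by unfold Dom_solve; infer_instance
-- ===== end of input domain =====

-- B replaces A's clamped-counter scan with a divide-and-conquer monoid reduction; same O(n) cost (objective: alternative).

-- ===== PORT A =====
def solveStep (st : Int × Int) (c : Char) : Int × Int :=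
  if c = 'S' then (st.1, st.2 + 1)
  else if st.2 > 0 then (st.1, st.2 - 1)
  else (st.1 + 1, st.2)

def solve (X : String) : Int :=
  let st := X.toList.foldl solveStep (0, 0)
  st.1 + st.2

-- ===== PORT B =====
-- merge of two half-summaries (unmatched closes, unmatched opens)
def dcCombine (p q : Int × Int) : Int × Int :=
  (p.1 + max 0 (q.1 - p.2), q.2 + max 0 (p.2 - q.1))

def dcRun (l : List Char) : Int × Int :=
  if l.length = 0 then (0, 0)
  else if l.length = 1 then (if l.headI = 'S' then (0, 1) else (1, 0))
  else dcCombine (dcRun (l.take (l.length / 2))) (dcRun (l.drop (l.length / 2)))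
termination_by l.length
decreasing_by
  · simp only [List.length_take]; omega
  · simp only [List.length_drop]; omega

def solve_alt (X : String) : Int :=
  let p := dcRun X.toList
  p.1 + p.2

-- ===== PRECONDITION & SPEC =====
def Spec_solve (X : String) (out : Int) : Prop := out = solve_alt X
instance (X : String) (out : Int) : Decidable (Spec_solve X out) := by unfold Spec_solve; infer_instance

-- ===== CLAIM (what is proved, stated in full; the proofs are below) =====
def Claim_equal_solve : Prop := ∀ (X : String), Dom_solve X → Spec_solve X (solve X)

-- ===== LEMMAS AND PROOFS =====

theorem solveStep_nonneg (l : List Char) (a k : Int) (ha : 0 ≤ a) (hk : 0 ≤ k) :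
    0 ≤ (l.foldl solveStep (a, k)).1 ∧ 0 ≤ (l.foldl solveStep (a, k)).2 := by
  induction l generalizing a k with
  | nil => exact ⟨ha, hk⟩
  | cons c l ih =>
    simp only [List.foldl_cons, solveStep]
    split_ifs <;> exact ih _ _ (by omega) (by omega)

theorem solveStep_shift (l : List Char) (a k : Int) (hk : 0 ≤ k) :
    l.foldl solveStep (a, k) =
      (a + max 0 ((l.foldl solveStep ((0 : Int), (0 : Int))).1 - k),
       (l.foldl solveStep ((0 : Int), (0 : Int))).2 +
         max 0 (k - (l.foldl solveStep ((0 : Int), (0 : Int))).1)) := by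
  induction l generalizing a k with
  | nil => simp [Prod.ext_iff]; omega
  | cons c l ih =>
    have hnn := solveStep_nonneg l 0 0 le_rfl le_rfl
    simp only [List.foldl_cons]
    by_cases hS : c = 'S'
    · have h1 : solveStep (a, k) c = (a, k + 1) := by simp [solveStep, hS]
      have h2 : solveStep ((0 : Int), (0 : Int)) c = (0, 1) := by simp [solveStep, hS]
      rw [h1, h2, ih a (k + 1) (by omega), ih 0 1 (by omega)]
      simp [Prod.ext_iff]; omega
    · by_cases hc : k > 0
      · have h1 : solveStep (a, k) c = (a, k - 1) := by simp [solveStep, hS, hc]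
        have h2 : solveStep ((0 : Int), (0 : Int)) c = (1, 0) := by simp [solveStep, hS]
        rw [h1, h2, ih a (k - 1) (by omega), ih 1 0 (by omega)]
        simp [Prod.ext_iff]; omega
      · have hk0 : k = 0 := by omega
        have h1 : solveStep (a, k) c = (a + 1, k) := by simp [solveStep, hS, hc]
        have h2 : solveStep ((0 : Int), (0 : Int)) c = (1, 0) := by simp [solveStep, hS]
        rw [h1, h2, hk0, ih (a + 1) 0 le_rfl, ih 1 0 le_rfl]
        simp [Prod.ext_iff]; omega

theorem dcRun_eq_foldl (l : List Char) :
    dcRun l = l.foldl solveStep ((0 : Int), (0 : Int)) := by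
  induction hn : l.length using Nat.strong_induction_on generalizing l with
  | _ n ih =>
  match l, hn with
  | [], _ => rw [dcRun]; simp
  | [c], _ =>
    rw [dcRun]
    by_cases hS : c = 'S' <;> simp [solveStep, hS]
  | c₁ :: c₂ :: t, hn =>
    rw [dcRun]
    rw [if_neg (by simp), if_neg (by simp)]
    rw [ih _ (by rw [← hn]; simp [List.length_take]; omega) _ rfl,
        ih _ (by rw [← hn]; simp [List.length_drop]; omega) _ rfl]
    conv_rhs => rw [← List.take_append_drop ((c₁ :: c₂ :: t).length / 2) (c₁ :: c₂ :: t)]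
    rw [List.foldl_append]
    have hnn := solveStep_nonneg ((c₁ :: c₂ :: t).take ((c₁ :: c₂ :: t).length / 2)) 0 0 le_rfl le_rfl
    rw [show ((c₁ :: c₂ :: t).take ((c₁ :: c₂ :: t).length / 2)).foldl solveStep ((0:Int),(0:Int)) =
        ((((c₁ :: c₂ :: t).take ((c₁ :: c₂ :: t).length / 2)).foldl solveStep ((0:Int),(0:Int))).1,
         (((c₁ :: c₂ :: t).take ((c₁ :: c₂ :: t).length / 2)).foldl solveStep ((0:Int),(0:Int))).2) from rfl]
    rw [solveStep_shift _ _ _ hnn.2]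
    simp [dcCombine]

-- ===== VERDICT (by name: the statement is the Claim_ definition above) =====
theorem solve_spec : Claim_equal_solve := by
  intro X _
  show solve X = solve_alt X
  simp [solve, solve_alt, dcRun_eq_foldl]
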